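-- pv_equiv track=rewrite | github.com/CoralShalmoni/genetic-art-generator | utils.py | get_clean_sequences
-- ===== SOURCE A (Python) =====
-- def get_clean_sequences(dna, valid_bases="ACTG"):
--     """Split DNA string into clean sub-sequences containing only valid bases."""
--     current = ""
--     sequences = []
--
--     for char in dna.upper():
--         if char in valid_bases:
--             current += char
--         else:
--             if current:
--                 sequences.append(current)
--                 current = ""
--     if current:
--         sequences.append(current)
--
--     return sequences
-- ===== SOURCE B (Python) =====
-- def get_clean_sequences(dna, valid_bases="ACTG"):
--     """Split DNA string into clean sub-sequences containing only valid bases."""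
--     s = dna.upper()
--     n = len(s)
--     sequences = []
--     i = 0
--     while i < n:
--         if s[i] in valid_bases:
--             j = i
--             while j < n and s[j] in valid_bases:
--                 j += 1
--             sequences.append(s[i:j])
--             i = j
--         else:
--             i += 1
--     return sequences
-- ===== Notes on version B (the rewrite author's own statement) =====
-- stated objective: alternative
-- what changed: Replaces the per-character accumulator-and-flush loop with an index scan that locates each maximal run of valid bases and slices it out of the string in one step.
import Mathlib
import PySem

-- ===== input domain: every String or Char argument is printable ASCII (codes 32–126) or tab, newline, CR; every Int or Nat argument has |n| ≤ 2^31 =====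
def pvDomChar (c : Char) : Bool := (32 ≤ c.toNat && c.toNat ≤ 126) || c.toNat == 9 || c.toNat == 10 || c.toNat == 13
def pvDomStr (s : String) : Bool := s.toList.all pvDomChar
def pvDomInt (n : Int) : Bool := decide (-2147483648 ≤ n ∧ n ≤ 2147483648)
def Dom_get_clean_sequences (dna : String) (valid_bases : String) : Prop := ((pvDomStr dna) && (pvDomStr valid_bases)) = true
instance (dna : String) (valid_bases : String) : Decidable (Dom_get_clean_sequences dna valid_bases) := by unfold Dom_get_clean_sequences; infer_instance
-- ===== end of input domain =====

-- B replaces A's per-character accumulator-and-flush loop with an index scan that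
-- slices out each maximal run of valid bases (alternative decomposition, same cost).


-- ===== PORT A =====
-- loop body: `if char in valid_bases: current += char  else: flush current`
-- (`char in valid_bases` is a one-character substring test = list membership, exact)
def gcsStep (vb : List Char) (st : List Char × List String) (c : Char) : List Char × List String :=
  if c ∈ vb then (st.1 ++ [c], st.2)
  else if st.1 ≠ [] then ([], st.2 ++ [String.ofList st.1]) else st

def get_clean_sequences (dna : String) (valid_bases : String) : List String :=
  let st := (PySem.Str.upper dna).toList.foldl (gcsStep valid_bases.toList) ([], [])
  if st.1 ≠ [] then st.2 ++ [String.ofList st.1] else st.2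

-- ===== PORT B =====
-- inner while loop: `while j < n and s[j] in valid_bases: j += 1`
def gcsScan (vb : List Char) (s : List Char) (j : Nat) : Nat :=
  if h : j < s.length then
    if s[j] ∈ vb then gcsScan vb s (j + 1) else j
  else j
termination_by s.length - j

theorem gcsScan_le (vb : List Char) (s : List Char) (j : Nat) : j ≤ gcsScan vb s j := by
  rw [gcsScan]
  split
  · split
    · exact Nat.le_trans (Nat.le_succ j) (gcsScan_le vb s (j + 1))
    · exact Nat.le_refl j
  · exact Nat.le_refl j
termination_by s.length - j

theorem gcsScan_gt (vb : List Char) (s : List Char) (j : Nat) (h : j < s.length)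
    (hv : s[j] ∈ vb) : j < gcsScan vb s j := by
  rw [gcsScan, dif_pos h, if_pos hv]
  exact Nat.lt_of_lt_of_le (Nat.lt_succ_self j) (gcsScan_le vb s (j + 1))

-- outer while loop over the index i; s[i:j] ported exactly as PySem.List.slice
def gcsAltGo (vb : List Char) (s : List Char) (i : Nat) : List String :=
  if h : i < s.length then
    if hv : s[i] ∈ vb then
      let j := gcsScan vb s i
      String.ofList (PySem.List.slice s (some (i : Int)) (some (j : Int))) :: gcsAltGo vb s j
    else gcsAltGo vb s (i + 1)
  else []
termination_by s.length - i
decreasing_by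
  · have := gcsScan_gt vb s i h hv; omega
  · omega

def get_clean_sequences_alt (dna : String) (valid_bases : String) : List String :=
  gcsAltGo valid_bases.toList (PySem.Str.upper dna).toList 0

-- ===== PRECONDITION & SPEC =====
def Spec_get_clean_sequences (dna : String) (valid_bases : String) (out : List String) : Prop := out = get_clean_sequences_alt dna valid_bases
instance (dna : String) (valid_bases : String) (out : List String) : Decidable (Spec_get_clean_sequences dna valid_bases out) := by unfold Spec_get_clean_sequences; infer_instance

-- ===== CLAIM (what is proved, stated in full; the proofs are below) =====
def Claim_equal_get_clean_sequences : Prop := ∀ (dna : String) (valid_bases : String), Dom_get_clean_sequences dna valid_bases → Spec_get_clean_sequences dna valid_bases (get_clean_sequences dna valid_bases)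

-- ===== LEMMAS AND PROOFS =====

-- the canonical "list of maximal valid runs" both ports are reduced to
def gcsRuns (vb : List Char) (pre : List Char) : List Char → List String
  | [] => if pre = [] then [] else [String.ofList pre]
  | c :: cs =>
      if c ∈ vb then gcsRuns vb (pre ++ [c]) cs
      else (if pre = [] then [] else [String.ofList pre]) ++ gcsRuns vb [] cs

theorem gcsA_eq_runs (vb : List Char) (cs : List Char) (pre : List Char) (seqs : List String) :
    (let st := cs.foldl (gcsStep vb) (pre, seqs);
     if st.1 ≠ [] then st.2 ++ [String.ofList st.1] else st.2) = seqs ++ gcsRuns vb pre cs := by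
  induction cs generalizing pre seqs with
  | nil =>
      simp only [List.foldl_nil, gcsRuns]
      by_cases h : pre = [] <;> simp [h]
  | cons c cs ih =>
      simp only [List.foldl_cons, gcsRuns, gcsStep]
      by_cases hv : c ∈ vb
      · simp only [hv, if_pos]
        exact ih (pre ++ [c]) seqs
      · simp only [hv, if_neg, not_false_iff]
        by_cases hp : pre = []
        · simp only [hp, ne_eq, not_true_eq_false, if_neg, not_false_iff]
          simpa using ih [] seqs
        · simp only [hp, ne_eq, not_false_iff, if_pos, if_neg]
          rw [ih [] (seqs ++ [String.ofList pre])]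
          simp

theorem gcsScan_eq (vb : List Char) (s : List Char) (j : Nat) :
    gcsScan vb s j = j + ((s.drop j).takeWhile (fun c => decide (c ∈ vb))).length := by
  rw [gcsScan]
  split
  · rename_i h
    rw [List.drop_eq_getElem_cons h]
    split
    · rename_i hv
      rw [gcsScan_eq vb s (j + 1)]
      simp only [List.takeWhile_cons, decide_eq_true hv, if_true, List.length_cons]
      omega
    · rename_i hv
      simp only [List.takeWhile_cons, decide_eq_false hv, Bool.false_eq_true, if_false,
        List.length_nil, Nat.add_zero]
  · rename_i h
    rw [List.drop_eq_nil_of_le (by omega)]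
    simp
termination_by s.length - j

theorem gcsRuns_pre_ne (vb : List Char) (cs : List Char) (pre : List Char) (hp : pre ≠ []) :
    gcsRuns vb pre cs = String.ofList (pre ++ cs.takeWhile (fun c => decide (c ∈ vb))) ::
      gcsRuns vb [] (cs.dropWhile (fun c => decide (c ∈ vb))) := by
  induction cs generalizing pre with
  | nil => simp [gcsRuns, hp]
  | cons c cs ih =>
      by_cases hv : c ∈ vb
      · simp only [gcsRuns, hv, if_pos, List.takeWhile_cons, List.dropWhile_cons, decide_true]
        rw [ih (pre ++ [c]) (by simp)]
        simp
      · simp [gcsRuns, hv, hp, List.takeWhile_cons, List.dropWhile_cons]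

theorem gcsTake_len_takeWhile {α : Type} (p : α → Bool) (l : List α) :
    l.take (l.takeWhile p).length = l.takeWhile p := by
  induction l with
  | nil => rfl
  | cons a l ih =>
      by_cases h : p a = true
      · simp [List.takeWhile_cons, h, ih]
      · simp [List.takeWhile_cons, h]

theorem gcsDrop_len_takeWhile {α : Type} (p : α → Bool) (l : List α) :
    l.drop (l.takeWhile p).length = l.dropWhile p := by
  induction l with
  | nil => rfl
  | cons a l ih =>
      by_cases h : p a = true
      · simp [List.takeWhile_cons, List.dropWhile_cons, h, ih]
      · simp [List.takeWhile_cons, List.dropWhile_cons, h]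

theorem gcsAltGo_eq_runs (vb : List Char) (s : List Char) (i : Nat) :
    gcsAltGo vb s i = gcsRuns vb [] (s.drop i) := by
  rw [gcsAltGo]
  split
  · rename_i h
    have hdrop : s.drop i = s[i] :: s.drop (i + 1) := List.drop_eq_getElem_cons h
    split
    · rename_i hv
      have hj := gcsScan_eq vb s i
      have hjgt := gcsScan_gt vb s i h hv
      have hslice : PySem.List.slice s (some (i : Int)) (some ((gcsScan vb s i : Nat) : Int))
          = (s.drop i).takeWhile (fun c => decide (c ∈ vb)) := by
        rw [PySem.List.slice_natCast]
        have h2 : gcsScan vb s i - i = ((s.drop i).takeWhile (fun c => decide (c ∈ vb))).length := by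
          omega
        rw [h2, gcsTake_len_takeWhile]
      have hdropj : s.drop (gcsScan vb s i) = (s.drop i).dropWhile (fun c => decide (c ∈ vb)) := by
        rw [hj, ← List.drop_drop, gcsDrop_len_takeWhile]
      show String.ofList (PySem.List.slice s (some (i : Int)) (some ((gcsScan vb s i : Nat) : Int))) ::
        gcsAltGo vb s (gcsScan vb s i) = gcsRuns vb [] (s.drop i)
      rw [gcsAltGo_eq_runs vb s (gcsScan vb s i), hslice, hdropj, hdrop]
      have hr : gcsRuns vb [] (s[i] :: s.drop (i + 1)) =
          if s[i] ∈ vb then gcsRuns vb ([] ++ [s[i]]) (s.drop (i + 1))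
          else (if ([] : List Char) = [] then [] else [String.ofList []]) ++
            gcsRuns vb [] (s.drop (i + 1)) := rfl
      rw [hr, if_pos hv, List.nil_append, gcsRuns_pre_ne vb _ [s[i]] (by simp)]
      simp only [List.takeWhile_cons, List.dropWhile_cons, decide_eq_true hv, if_true,
        List.singleton_append]
    · rename_i hv
      rw [gcsAltGo_eq_runs vb s (i + 1), hdrop, gcsRuns, if_neg hv]
      simp
  · rename_i h
    rw [List.drop_eq_nil_of_le (by omega)]
    simp [gcsRuns]
termination_by s.length - i
decreasing_by all_goals omega

-- ===== VERDICT (by name: the statement is the Claim_ definition above) =====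
theorem get_clean_sequences_spec : Claim_equal_get_clean_sequences := by
  intro dna valid_bases _
  unfold Spec_get_clean_sequences get_clean_sequences get_clean_sequences_alt
  rw [gcsA_eq_runs, gcsAltGo_eq_runs]
  simp
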